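-- pv_equiv track=rewrite | github.com/LilPomidorLil/yandex_algorithm | Lecture/Linear Search/task_4.py | findminchet
-- ===== SOURCE A (Python) =====
-- def findminchet(seq):
--     ans = -1
--     flag = False
--
--
--     for i in range(len(seq)):
--         if (seq[i] % 2 == 0) and (not flag or ans > seq[i]):
--             ans = seq[i]
--             flag = True
--     return ans
-- ===== SOURCE B (Python) =====
-- def findminchet(seq):
--     evens = [x for x in seq if x % 2 == 0]
--     return min(evens) if evens else -1
-- ===== Notes on version B (the rewrite author's own statement) =====
-- stated objective: simpler
-- what changed: Replaces the fused index loop with ans/flag state tracking by a two-stage pipeline: filter the even elements, then a single min reduction with -1 for the empty case.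
import Mathlib
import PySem

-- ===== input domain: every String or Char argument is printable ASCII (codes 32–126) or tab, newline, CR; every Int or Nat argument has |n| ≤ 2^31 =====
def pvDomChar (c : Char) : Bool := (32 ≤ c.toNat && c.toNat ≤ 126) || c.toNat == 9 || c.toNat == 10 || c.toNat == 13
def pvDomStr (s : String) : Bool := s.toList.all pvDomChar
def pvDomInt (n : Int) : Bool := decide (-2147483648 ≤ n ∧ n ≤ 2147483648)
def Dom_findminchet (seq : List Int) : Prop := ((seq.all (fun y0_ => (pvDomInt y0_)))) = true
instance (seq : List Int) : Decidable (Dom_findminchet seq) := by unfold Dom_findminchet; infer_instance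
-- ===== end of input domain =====

-- B replaces A's fused ans/flag-tracking index loop by a two-stage pipeline: filter evens, then one min reduction (objective: simpler).

-- ===== PORT A =====
-- A's loop body: state (ans, flag); index loop over range(len(seq)) reading seq[i] (always in range, default unused)
def findminchetStep (st : Int × Bool) (x : Int) : Int × Bool :=
  if (PySem.Int.mod x 2 == 0) && (!st.2 || decide (st.1 > x)) then (x, true) else st

def findminchet (seq : List Int) : Int :=
  ((PySem.List.pyRange 0 (PySem.List.len seq) 1).foldl
      (fun st i => findminchetStep st (PySem.List.pyGetD seq i 0)) (-1, false)).1

-- ===== PORT B =====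
def findminchet_alt (seq : List Int) : Int :=
  let evens := seq.filter (fun x => PySem.Int.mod x 2 == 0)
  match PySem.List.min? evens (fun x => x) with
  | some m => m
  | none => -1

-- ===== PRECONDITION & SPEC =====
def Spec_findminchet (seq : List Int) (out : Int) : Prop := out = findminchet_alt seq
instance (seq : List Int) (out : Int) : Decidable (Spec_findminchet seq out) := by unfold Spec_findminchet; infer_instance

-- ===== CLAIM (what is proved, stated in full; the proofs are below) =====
def Claim_equal_findminchet : Prop := ∀ (seq : List Int), Dom_findminchet seq → Spec_findminchet seq (findminchet seq)

-- ===== LEMMAS AND PROOFS =====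

theorem findminchetStep_even_gt (a : Int) (b : Bool) (x : Int)
    (he : (2:Int) ∣ x) (h : b = false ∨ x < a) :
    findminchetStep (a, b) x = (x, true) := by
  unfold findminchetStep; rw [if_pos]; simp; exact ⟨he, h⟩

theorem findminchetStep_skip (a : Int) (b : Bool) (x : Int)
    (h : (2:Int) ∣ x → b = true ∧ a ≤ x) :
    findminchetStep (a, b) x = (a, b) := by
  unfold findminchetStep; rw [if_neg]; simp; exact h

theorem findminchet_flag_true (l : List Int) (a : Int) :
    l.foldl findminchetStep (a, true) =
      ((l.filter (fun x => PySem.Int.mod x 2 == 0)).foldl min a, true) := by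
  induction l generalizing a with
  | nil => rfl
  | cons x t ih =>
    rw [List.foldl_cons, List.filter_cons]
    by_cases he : (PySem.Int.mod x 2 == 0) = true
    · rw [if_pos he]
      by_cases hgt : a > x
      · rw [findminchetStep_even_gt a true x (by simpa using he) (Or.inr hgt), ih,
          List.foldl_cons, min_eq_right (le_of_lt hgt)]
      · rw [findminchetStep_skip a true x (fun _ => ⟨rfl, by omega⟩), ih,
          List.foldl_cons, min_eq_left (by omega)]
    · have hne : ¬ (2:Int) ∣ x := by simp at he; omega
      rw [if_neg he, findminchetStep_skip a true x (fun hd => absurd hd hne), ih]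

theorem findminchet_loop_eq (l : List Int) :
    (l.foldl findminchetStep (-1, false)).1 =
      match PySem.List.min? (l.filter (fun x => PySem.Int.mod x 2 == 0)) (fun x => x) with
      | some m => m
      | none => -1 := by
  induction l with
  | nil => rfl
  | cons x t ih =>
    rw [List.foldl_cons, List.filter_cons]
    by_cases he : (PySem.Int.mod x 2 == 0) = true
    · rw [if_pos he, findminchetStep_even_gt (-1) false x (by simpa using he) (Or.inl rfl),
        findminchet_flag_true, PySem.List.min?_id_cons]
    · have hne : ¬ (2:Int) ∣ x := by simp at he; omega
      rw [if_neg he, findminchetStep_skip (-1) false x (fun hd => absurd hd hne), ih]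

-- ===== VERDICT (by name: the statement is the Claim_ definition above) =====
theorem findminchet_spec : Claim_equal_findminchet := by
  intro seq _
  unfold Spec_findminchet findminchet findminchet_alt
  rw [PySem.List.foldl_pyRange_zero_pyGetD seq 0 findminchetStep (-1, false)]
  simpa using findminchet_loop_eq seq
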